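-- pv_equiv track=rewrite | github.com/edouardmulliez/adventofcode | 2019/aoc_2019/day22/day22.py | part_2
-- ===== SOURCE A (Python) =====
-- from enum import Enum
--
-- class Operation(Enum):
--     DEAL_NEW = 0
--     CUT = 1
--     DEAL_INCREMENT = 2
--
-- def parse(command: str):
--     command = command.strip().lower()
--     if command.startswith("cut"):
--         n = int(command[4:])
--         return Operation.CUT, n
--     elif command.startswith("deal into new stack"):
--         return Operation.DEAL_NEW, None
--     elif command.startswith("deal with increment"):
--         n = int(command[19:])
--         return Operation.DEAL_INCREMENT, n
--     else:
--         raise ValueError(f"Cannot parse command: {command}")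
--
-- def update_params(command: str, multiplier: int, constant: int, nb_cards):
--     op, n = parse(command)
--     if op == Operation.CUT:
--         constant = (constant - n) % nb_cards
--     elif op == Operation.DEAL_NEW:
--         multiplier = -multiplier
--         constant = (-constant - 1) % nb_cards
--     elif op == Operation.DEAL_INCREMENT:
--         constant = (constant * n) % nb_cards
--         multiplier = multiplier * n
--     else:
--         raise ValueError(f"Operation {op} is not implemented.")
--     return multiplier, constant
--
-- def part_2(nb_cards, commands, position, nb_shuffles):
--     multiplier = 1
--     constant = 0
--     for command in commands:
--         multiplier, constant = update_params(command, multiplier, constant, nb_cards)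
--
--     # Invert relation: y = m x + c [N]  <=>  (y-c) * modinv(m) = x [N]
--     inv_multiplier = modinv(multiplier, nb_cards)
--     inv_constant = (-inv_multiplier * constant) % nb_cards
--
--     inv_repeat_multiplier, inv_repeat_constant = update_params_for_repeated_cycles(
--         inv_multiplier,
--         inv_constant,
--         nb_cards,
--         nb_shuffles
--     )
--
--     value = (inv_repeat_multiplier * position + inv_repeat_constant) % nb_cards
--     return value
--
-- def update_params_for_repeated_cycles(multiplier, constant, nb_cards, times):
--     if times == 1:
--         final_multiplier = multiplier
--         final_constant = constant
--     elif times % 2 == 0: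
--         m, c = update_params_for_repeated_cycles(multiplier, constant, nb_cards, times // 2)
--         final_multiplier = m ** 2
--         final_constant = (m + 1) * c
--     else:
--         m, c = update_params_for_repeated_cycles(multiplier, constant, nb_cards, times - 1)
--         final_multiplier = m * multiplier
--         final_constant = multiplier * c + constant
--     final_multiplier = final_multiplier % nb_cards
--     final_constant = final_constant % nb_cards
--     return final_multiplier, final_constant
--
-- def egcd(a, b):
--     if a == 0:
--         return (b, 0, 1)
--     else:
--         g, y, x = egcd(b % a, a)
--         return (g, x - (b // a) * y, y)
--
-- def modinv(a, m):
--     a = a % m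
--     g, x, y = egcd(a, m)
--     if g != 1:
--         raise Exception('modular inverse does not exist')
--     else:
--         return x % m
-- ===== SOURCE B (Python) =====
-- def part_2(nb_cards, commands, position, nb_shuffles):
--     N = nb_cards
--
--     def affine(cmd):
--         cmd = cmd.strip().lower()
--         if cmd.startswith("cut"):
--             return 1, -int(cmd[4:])
--         if cmd.startswith("deal into new stack"):
--             return -1, -1
--         if cmd.startswith("deal with increment"):
--             return int(cmd[19:]), 0
--         raise ValueError(f"Cannot parse command: {cmd}")
--
--     # fold all commands into one affine map x -> m*x + c (mod N), reduced as we go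
--     m, c = 1, 0
--     for cmd in commands:
--         a, b = affine(cmd)
--         m, c = (a * m) % N, (a * c + b) % N
--
--     # invert it
--     inv_m = pow(m, -1, N)
--     inv_c = (-inv_m * c) % N
--
--     # raise the inverse map to the nb_shuffles-th power by iterative binary exponentiation
--     acc_m, acc_c = 1, 0
--     base_m, base_c = inv_m, inv_c
--     e = nb_shuffles
--     while e > 0:
--         if e % 2 == 1:
--             acc_m, acc_c = (base_m * acc_m) % N, (base_m * acc_c + base_c) % N
--         base_m, base_c = (base_m * base_m) % N, (base_m * base_c + base_c) % N
--         e //= 2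
--     return (acc_m * position + acc_c) % N
-- ===== Notes on version B (the rewrite author's own statement) =====
-- stated objective: alternative
-- what changed: B folds each shuffle command directly into one mod-reduced affine pair (via a per-command (a,b) map) instead of A's three-branch in-place parameter updates, computes the modular inverse with Python's pow(m,-1,N) instead of a hand-written recursive extended Euclid, and replaces A's recursive update_params_for_repeated_cycles with an iterative binary exponentiation-by-squaring loop over the bits of nb_shuffles.
import Mathlib
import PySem

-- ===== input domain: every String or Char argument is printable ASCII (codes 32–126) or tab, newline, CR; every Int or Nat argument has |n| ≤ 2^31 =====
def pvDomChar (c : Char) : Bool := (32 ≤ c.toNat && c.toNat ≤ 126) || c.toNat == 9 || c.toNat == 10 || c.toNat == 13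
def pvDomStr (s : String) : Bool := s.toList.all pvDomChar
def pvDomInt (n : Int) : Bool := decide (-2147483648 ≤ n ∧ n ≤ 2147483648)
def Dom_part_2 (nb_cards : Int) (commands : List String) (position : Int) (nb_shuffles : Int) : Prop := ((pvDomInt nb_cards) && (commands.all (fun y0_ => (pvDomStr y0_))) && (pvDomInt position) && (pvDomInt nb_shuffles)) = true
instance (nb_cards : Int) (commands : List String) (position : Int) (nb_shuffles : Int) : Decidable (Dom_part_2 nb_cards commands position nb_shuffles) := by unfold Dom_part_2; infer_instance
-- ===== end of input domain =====

-- B folds each command directly into a reduced affine map and replaces A's recursive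
-- repeated-cycle doubling by an iterative binary-exponentiation loop (objective: alternative).

-- ===== PORT A =====

/-- A's `Operation` enum together with the parsed payload `n`. -/
inductive OpA where
  | cutOp : Int → OpA
  | newOp : OpA
  | incOp : Int → OpA
deriving DecidableEq, Repr

/-- Port of A's `parse`; `none` is exactly where the Python raises `ValueError`. -/
def parseA (command : String) : Option OpA :=
  let c := PySem.Chars.lower (PySem.Chars.strip command.toList)
  if PySem.Chars.startswith c "cut".toList then
    match PySem.Int.ofChars? (PySem.List.slice c (some 4) none) with
    | some n => some (OpA.cutOp n)
    | none => none
  else if PySem.Chars.startswith c "deal into new stack".toList then some OpA.newOp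
  else if PySem.Chars.startswith c "deal with increment".toList then
    match PySem.Int.ofChars? (PySem.List.slice c (some 19) none) with
    | some n => some (OpA.incOp n)
    | none => none
  else none

/-- Port of A's `update_params` (`none` = the Python raised while parsing). -/
def updateParamsA (command : String) (multiplier constant nb_cards : Int) : Option (Int × Int) :=
  match parseA command with
  | some (OpA.cutOp n) => some (multiplier, PySem.Int.mod (constant - n) nb_cards)
  | some OpA.newOp => some (-multiplier, PySem.Int.mod (-constant - 1) nb_cards)
  | some (OpA.incOp n) => some (multiplier * n, PySem.Int.mod (constant * n) nb_cards)
  | none => none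

/-- A's loop body over `commands` (threads the parse failure). -/
def stepA (nb_cards : Int) (st : Option (Int × Int)) (command : String) : Option (Int × Int) :=
  match st with
  | none => none
  | some (m, c) => updateParamsA command m c nb_cards

/-- Port of A's recursive `egcd`, with fuel for totality (enough fuel is unreachable junk). -/
def egcdA : Nat → Int → Int → Int × Int × Int
  | 0, _, b => (b, 0, 1)
  | fuel+1, a, b =>
    if a = 0 then (b, 0, 1)
    else
      match egcdA fuel (PySem.Int.mod b a) a with
      | (g, y, x) => (g, x - PySem.Int.floordiv b a * y, y)

/-- Port of A's `modinv`; the `g ≠ 1` branch is the Python `raise`, excluded by `Pre_`. -/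
def modinvA (a m : Int) : Int :=
  let a' := PySem.Int.mod a m
  match egcdA (a'.toNat + 1) a' m with
  | (g, x, _) => if g ≠ 1 then 0 else PySem.Int.mod x m

/-- Port of A's recursive `update_params_for_repeated_cycles`; fuel `times.toNat` suffices
    for `times ≥ 1` (the Python recurses forever for `times ≤ 0`, excluded by `Pre_`). -/
def upfrcA : Nat → Int → Int → Int → Int → Int × Int
  | 0, m, c, nb_cards, _ => (PySem.Int.mod m nb_cards, PySem.Int.mod c nb_cards)
  | fuel+1, multiplier, constant, nb_cards, times =>
    if times = 1 then (PySem.Int.mod multiplier nb_cards, PySem.Int.mod constant nb_cards)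
    else if PySem.Int.mod times 2 = 0 then
      match upfrcA fuel multiplier constant nb_cards (PySem.Int.floordiv times 2) with
      | (m, c) => (PySem.Int.mod (m ^ 2) nb_cards, PySem.Int.mod ((m + 1) * c) nb_cards)
    else
      match upfrcA fuel multiplier constant nb_cards (times - 1) with
      | (m, c) => (PySem.Int.mod (m * multiplier) nb_cards, PySem.Int.mod (multiplier * c + constant) nb_cards)

def part_2 (nb_cards : Int) (commands : List String) (position : Int) (nb_shuffles : Int) : Int :=
  match commands.foldl (stepA nb_cards) (some ((1 : Int), (0 : Int))) with
  | none => 0   -- a command failed to parse: the Python raised; excluded by Pre_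
  | some (multiplier, constant) =>
    let inv_multiplier := modinvA multiplier nb_cards
    let inv_constant := PySem.Int.mod (-inv_multiplier * constant) nb_cards
    match upfrcA nb_shuffles.toNat inv_multiplier inv_constant nb_cards nb_shuffles with
    | (rm, rc) => PySem.Int.mod (rm * position + rc) nb_cards

-- ===== PORT B =====

/-- B's `affine`: each command as an affine map `(a, b)`; `none` = Python's `ValueError`. -/
def affineB (cmd : String) : Option (Int × Int) :=
  let c := PySem.Chars.lower (PySem.Chars.strip cmd.toList)
  if PySem.Chars.startswith c "cut".toList then
    (PySem.Int.ofChars? (PySem.List.slice c (some 4) none)).map (fun n => (1, -n))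
  else if PySem.Chars.startswith c "deal into new stack".toList then some (-1, -1)
  else if PySem.Chars.startswith c "deal with increment".toList then
    (PySem.Int.ofChars? (PySem.List.slice c (some 19) none)).map (fun n => (n, 0))
  else none

/-- B's reduced affine composition: `compB N p q = p ∘ q` reduced mod `N`. -/
def compB (N : Int) (p q : Int × Int) : Int × Int :=
  (PySem.Int.mod (p.1 * q.1) N, PySem.Int.mod (p.1 * q.2 + p.2) N)

/-- B's fold body over `commands`. -/
def stepB (nb_cards : Int) (st : Option (Int × Int)) (cmd : String) : Option (Int × Int) :=
  match st, affineB cmd with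
  | some mc, some ab => some (compB nb_cards ab mc)
  | _, _ => none

/-- Port of Source B's `pow(m, -1, N)`: the canonical modular inverse via Bézout coefficients
    (exact whenever `gcd(m, N) = 1` and `N ≥ 1`, which `Pre_` guarantees; Python raises otherwise). -/
def invB (m N : Int) : Int := PySem.Int.mod (Int.gcdA (PySem.Int.mod m N) N) N

/-- B's binary-exponentiation `while` loop, with fuel for totality
    (`nb_shuffles.toNat` bounds the number of halvings). -/
def bloopB : Nat → Int → Int → Int × Int → Int × Int → Int × Int
  | 0, _, _, _, acc => acc
  | fuel+1, N, e, base, acc =>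
    if e ≤ 0 then acc
    else
      bloopB fuel N (PySem.Int.floordiv e 2) (compB N base base)
        (if PySem.Int.mod e 2 = 1 then compB N base acc else acc)

def part_2_alt (nb_cards : Int) (commands : List String) (position : Int) (nb_shuffles : Int) : Int :=
  match commands.foldl (stepB nb_cards) (some ((1 : Int), (0 : Int))) with
  | none => 0   -- a command failed to parse: Source B raised; excluded by Pre_
  | some (m, c) =>
    let inv_m := invB m nb_cards
    let inv_c := PySem.Int.mod (-inv_m * c) nb_cards
    match bloopB nb_shuffles.toNat nb_cards nb_shuffles (inv_m, inv_c) (1, 0) with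
    | (am, ac) => PySem.Int.mod (am * position + ac) nb_cards

-- ===== PRECONDITION & SPEC =====

/-- One command is well formed (parses exactly as A's `parse` does) and, for a
    `deal with increment n`, `n` is invertible mod `nb_cards`. -/
def preCmd (N : Int) (cmd : String) : Bool :=
  let c := PySem.Chars.lower (PySem.Chars.strip cmd.toList)
  if PySem.Chars.startswith c "cut".toList then
    (PySem.Int.ofChars? (PySem.List.slice c (some 4) none)).isSome
  else if PySem.Chars.startswith c "deal into new stack".toList then true
  else if PySem.Chars.startswith c "deal with increment".toList then
    match PySem.Int.ofChars? (PySem.List.slice c (some 19) none) with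
    | some n => Int.gcd n N == 1
    | none => false
  else false

-- Pre_ excludes exactly the inputs where the Python A raises: nb_cards ≤ 0 (ZeroDivisionError
-- or a non-existing modular inverse), nb_shuffles ≤ 0 (unbounded recursion), an unparseable
-- command (ValueError) and a `deal with increment` whose increment is not coprime to nb_cards
-- (modular-inverse Exception). A returns a value everywhere inside Pre_.
def Pre_part_2 (nb_cards : Int) (commands : List String) (position : Int) (nb_shuffles : Int) : Prop :=
  1 ≤ nb_cards ∧ 1 ≤ nb_shuffles ∧ ∀ cmd ∈ commands, preCmd nb_cards cmd = true

instance (nb_cards : Int) (commands : List String) (position : Int) (nb_shuffles : Int) : Decidable (Pre_part_2 nb_cards commands position nb_shuffles) := by unfold Pre_part_2; infer_instance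

def pvWitness_part_2 : Int × List String × Int × Int :=
  (10, ["cut 3", "deal into new stack", "deal with increment 7"], 4, 5)

def Spec_part_2 (nb_cards : Int) (commands : List String) (position : Int) (nb_shuffles : Int) (out : Int) : Prop := out = part_2_alt nb_cards commands position nb_shuffles
instance (nb_cards : Int) (commands : List String) (position : Int) (nb_shuffles : Int) (out : Int) : Decidable (Spec_part_2 nb_cards commands position nb_shuffles out) := by unfold Spec_part_2; infer_instance

-- ===== CLAIM (what is proved, stated in full; the proofs are below) =====
def Claim_equal_part_2 : Prop := ∀ (nb_cards : Int) (commands : List String) (position : Int) (nb_shuffles : Int), Dom_part_2 nb_cards commands position nb_shuffles → Pre_part_2 nb_cards commands position nb_shuffles → Spec_part_2 nb_cards commands position nb_shuffles (part_2 nb_cards commands position nb_shuffles)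


-- ===== LEMMAS AND PROOFS =====

/-- Unreduced affine composition: `(amul p q) x = p (q x)` for maps `x ↦ p.1 * x + p.2`. -/
def amul (p q : Int × Int) : Int × Int := (p.1 * q.1, p.1 * q.2 + p.2)

/-- Iterated composition `p ∘ ⋯ ∘ p`. -/
def apow (p : Int × Int) : Nat → Int × Int
  | 0 => (1, 0)
  | n+1 => amul p (apow p n)

/-- Componentwise reduction mod `N`. -/
def ared (N : Int) (p : Int × Int) : Int × Int := (p.1 % N, p.2 % N)

theorem apow_one (p : Int × Int) : apow p 1 = p := by simp [apow, amul]

theorem amul_id_right (p : Int × Int) : amul p (1, 0) = p := by simp [amul]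


theorem amul_assoc (p q r : Int × Int) : amul (amul p q) r = amul p (amul q r) := by
  simp [amul]; constructor <;> ring

theorem amul_id_left (p : Int × Int) : amul (1,0) p = p := by simp [amul]

theorem apow_add (p : Int × Int) (m n : Nat) : apow p (m + n) = amul (apow p m) (apow p n) := by
  induction m with
  | zero => simp [apow, amul_id_left]
  | succ k ih => rw [Nat.succ_add, apow, apow, ih, amul_assoc]

theorem ared_mul_left (N : Int) (p q : Int × Int) : ared N (amul (ared N p) q) = ared N (amul p q) := by
  simp [ared, amul]
  constructor
  · conv_lhs => rw [Int.mul_emod]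
    conv_rhs => rw [Int.mul_emod]
    simp [Int.emod_emod_of_dvd _ dvd_rfl]
  · conv_lhs => rw [Int.add_emod, Int.mul_emod]
    conv_rhs => rw [Int.add_emod, Int.mul_emod]
    simp [Int.emod_emod_of_dvd _ dvd_rfl]

theorem ared_mul_right (N : Int) (p q : Int × Int) : ared N (amul p (ared N q)) = ared N (amul p q) := by
  simp [ared, amul]
  constructor
  · conv_lhs => rw [Int.mul_emod]
    conv_rhs => rw [Int.mul_emod]
    simp [Int.emod_emod_of_dvd _ dvd_rfl]
  · conv_lhs => rw [Int.add_emod, Int.mul_emod]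
    conv_rhs => rw [Int.add_emod, Int.mul_emod]
    simp [Int.emod_emod_of_dvd _ dvd_rfl]

theorem apow_sq (b : Int × Int) (j : Nat) : apow (amul b b) j = apow b (2 * j) := by
  induction j with
  | zero => rfl
  | succ k ih =>
    rw [apow, ih, show 2*(k+1) = 2 + 2*k from by ring, apow_add,
      show apow b 2 = amul b b from by simp [apow, amul]]

theorem apow_ared (N : Int) (s r : Int × Int) (j : Nat) :
    ared N (amul (apow (ared N s) j) r) = ared N (amul (apow s j) r) := by
  induction j generalizing r with
  | zero => rfl
  | succ k ih =>
    rw [apow, apow, amul_assoc, amul_assoc, ared_mul_left, ← ared_mul_right N s (amul (apow (ared N s) k) r), ih, ared_mul_right]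

theorem compB_eq (N : Int) (hN : 0 < N) (p q : Int × Int) : compB N p q = ared N (amul p q) := by
  simp [compB, amul, ared, PySem.Int.mod_eq_emod_of_pos hN]

theorem upfrcA_eq (N m c : Int) (hN : 0 < N) :
    ∀ (fuel : Nat) (t : Int), 1 ≤ t → t.toNat ≤ fuel →
      upfrcA fuel m c N t = ared N (apow (m, c) t.toNat) := by
  intro fuel
  induction fuel with
  | zero => intro t ht hf; omega
  | succ f ih =>
    intro t ht hf
    by_cases h1 : t = 1
    · subst h1
      simp [upfrcA, apow_one, ared, PySem.Int.mod_eq_emod_of_pos hN]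
    · have ht2 : 2 ≤ t := by omega
      have hmod2 : PySem.Int.mod t 2 = t % 2 := PySem.Int.mod_eq_emod_of_pos (by norm_num : (0:Int) < 2)
      have hfd : PySem.Int.floordiv t 2 = t / 2 := PySem.Int.floordiv_eq_ediv_of_pos (by norm_num : (0:Int) < 2)
      by_cases he : t % 2 = 0
      · -- even
        have h1' : 1 ≤ t / 2 := by omega
        have h2' : (t / 2).toNat ≤ f := by omega
        rcases hAP : apow (m, c) (t / 2).toNat with ⟨x1, x2⟩
        rw [upfrcA, if_neg h1, hmod2, if_pos he, hfd, ih (t / 2) h1' h2', hAP]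
        simp only [ared]
        have key : (PySem.Int.mod ((x1 % N) ^ 2) N, PySem.Int.mod ((x1 % N + 1) * (x2 % N)) N)
            = ared N (amul (ared N (x1, x2)) (ared N (x1, x2))) := by
          simp only [ared, amul, PySem.Int.mod_eq_emod_of_pos hN, Prod.mk.injEq]
          constructor <;> first | trivial | (congr 1; ring)
        rw [key, ared_mul_left, ared_mul_right, ← hAP, ← apow_add,
          show (t / 2).toNat + (t / 2).toNat = t.toNat from by omega]
        rfl
      · -- odd
        have h1' : 1 ≤ t - 1 := by omega
        have h2' : (t - 1).toNat ≤ f := by omega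
        rcases hAP : apow (m, c) (t - 1).toNat with ⟨x1, x2⟩
        rw [upfrcA, if_neg h1, hmod2, if_neg he, ih (t - 1) h1' h2', hAP]
        simp only [ared]
        have key : (PySem.Int.mod ((x1 % N) * m) N, PySem.Int.mod (m * (x2 % N) + c) N)
            = ared N (amul (m, c) (ared N (x1, x2))) := by
          simp only [ared, amul, PySem.Int.mod_eq_emod_of_pos hN, Prod.mk.injEq]
          constructor <;> first | trivial | (congr 1; ring)
        rw [key, ared_mul_right, ← hAP,
          show amul (m, c) (apow (m, c) (t - 1).toNat) = apow (m, c) ((t - 1).toNat + 1) from rfl,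
          show (t - 1).toNat + 1 = t.toNat from by omega]
        rfl

theorem bloopB_eq (N : Int) (hN : 0 < N) :
    ∀ (fuel : Nat) (e : Int) (b a : Int × Int), e.toNat ≤ fuel →
      ared N (bloopB fuel N e b a) = ared N (amul (apow b e.toNat) a) := by
  intro fuel
  induction fuel with
  | zero =>
    intro e b a hf
    rw [show e.toNat = 0 from by omega]
    simp [bloopB, apow, amul_id_left]
  | succ f ih =>
    intro e b a hf
    by_cases he : e ≤ 0
    · rw [show e.toNat = 0 from by omega]
      simp [bloopB, if_pos he, apow, amul_id_left]
    · have he1 : 1 ≤ e := by omega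
      have hmod2 : PySem.Int.mod e 2 = e % 2 := PySem.Int.mod_eq_emod_of_pos (by norm_num : (0:Int) < 2)
      have hfd : PySem.Int.floordiv e 2 = e / 2 := PySem.Int.floordiv_eq_ediv_of_pos (by norm_num : (0:Int) < 2)
      have h2' : (e / 2).toNat ≤ f := by omega
      rw [bloopB, if_neg he, hmod2, hfd, ih (e / 2) _ _ h2', compB_eq N hN,
        apow_ared, apow_sq]
      by_cases hp : e % 2 = 1
      · rw [if_pos hp, compB_eq N hN, ared_mul_right, ← amul_assoc,
          show amul (apow b (2 * (e / 2).toNat)) b = apow b (2 * (e / 2).toNat + 1) from by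
            rw [apow_add, apow_one],
          show 2 * (e / 2).toNat + 1 = e.toNat from by omega]
      · rw [if_neg hp, show 2 * (e / 2).toNat = e.toNat from by omega]

theorem egcdA_spec : ∀ (fuel : Nat) (a b : Int), 0 ≤ a → 0 ≤ b → a.toNat < fuel →
    (egcdA fuel a b).1 = (Int.gcd a b : Int) ∧
    a * (egcdA fuel a b).2.1 + b * (egcdA fuel a b).2.2 = (egcdA fuel a b).1 := by
  intro fuel
  induction fuel with
  | zero => intro a b _ _ h; omega
  | succ f ih =>
    intro a b ha hb hfuel
    by_cases h0 : a = 0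
    · subst h0
      have hred : egcdA (f + 1) 0 b = (b, 0, 1) := by rw [egcdA]; simp
      rw [hred]
      constructor
      · simp only [Int.gcd_zero_left]
        omega
      · simp
    · have ha1 : 1 ≤ a := by omega
      have hmod : PySem.Int.mod b a = b % a := PySem.Int.mod_eq_emod_of_pos (by omega : (0:Int) < a)
      have hfd : PySem.Int.floordiv b a = b / a := PySem.Int.floordiv_eq_ediv_of_pos (by omega : (0:Int) < a)
      have hm0 : 0 ≤ b % a := Int.emod_nonneg b (by omega)
      have hmlt : b % a < a := Int.emod_lt_of_pos b (by omega)
      have hrec := ih (b % a) a hm0 ha (by omega)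
      rcases hE : egcdA f (b % a) a with ⟨g, y, x⟩
      rw [hE] at hrec
      rw [egcdA, if_neg h0, hmod, hfd, hE]
      simp only at hrec ⊢
      constructor
      · rw [hrec.1, Int.gcd_emod b a, Int.gcd_comm]
      · have hb' : b % a = b - a * (b / a) := Int.emod_def b a
        linear_combination hrec.2 - y * hb'

theorem modinv_unique (N m x y : Int) (hx0 : 0 ≤ x) (hxN : x < N)
    (hy0 : 0 ≤ y) (hyN : y < N) (hx : m * x % N = 1 % N) (hy : m * y % N = 1 % N) : x = y := by
  have hxy : x ≡ y [ZMOD N] := by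
    calc x ≡ x * (m * y) [ZMOD N] := by
            conv_lhs => rw [show x = x * 1 from by ring]
            exact Int.ModEq.mul_left x (hy.symm)
      _ = (m * x) * y := by ring
      _ ≡ 1 * y [ZMOD N] := Int.ModEq.mul_right y hx
      _ = y := by ring
  have : x % N = y % N := hxy
  rwa [Int.emod_eq_of_lt hx0 hxN, Int.emod_eq_of_lt hy0 hyN] at this

theorem modinv_eq (N mA mB : Int) (hN : 0 < N) (hmod : mB % N = mA % N)
    (hg : Int.gcd mA N = 1) : modinvA mA N = invB mB N := by
  have ha0e : PySem.Int.mod mA N = mA % N := PySem.Int.mod_eq_emod_of_pos hN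
  have hb0e : PySem.Int.mod mB N = mB % N := PySem.Int.mod_eq_emod_of_pos hN
  set a0 := mA % N with ha0
  have h00 : 0 ≤ a0 := Int.emod_nonneg mA (by omega)
  have hgcd : Int.gcd a0 N = 1 := by rw [ha0, Int.gcd_emod mA N]; exact hg
  obtain ⟨hgA, hbez⟩ := egcdA_spec (a0.toNat + 1) a0 N h00 (le_of_lt hN) (by omega)
  rcases hE : egcdA (a0.toNat + 1) a0 N with ⟨g, x, y⟩
  rw [hE] at hgA hbez
  simp only at hgA hbez
  have hg1 : g = 1 := by rw [hgA, hgcd]; rfl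
  have hAside : modinvA mA N = x % N := by
    unfold modinvA
    simp only [ha0e, hE]
    rw [if_neg (by simp [hg1]), PySem.Int.mod_eq_emod_of_pos hN]
  have hBside : invB mB N = Int.gcdA a0 N % N := by
    unfold invB
    rw [hb0e, hmod, PySem.Int.mod_eq_emod_of_pos hN]
  rw [hAside, hBside]
  apply modinv_unique N a0 _ _ (Int.emod_nonneg x (by omega)) (Int.emod_lt_of_pos x hN)
    (Int.emod_nonneg _ (by omega)) (Int.emod_lt_of_pos _ hN)
  · -- mA * (x % N) % N = 1 % N
    have e2 : (x % N : Int) ≡ x [ZMOD N] := Int.emod_emod_of_dvd x dvd_rfl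
    have hax : a0 * x = 1 - N * y := by rw [hg1] at hbez; linarith
    have h2 : a0 * x ≡ 1 [ZMOD N] := by
      show (a0 * x) % N = 1 % N
      rw [hax, Int.sub_mul_emod_self_left]
    exact (Int.ModEq.mul_left a0 e2).trans h2
  · -- mA * (gcdA a0 N % N) % N = 1 % N
    have e2 : (Int.gcdA a0 N % N : Int) ≡ Int.gcdA a0 N [ZMOD N] := Int.emod_emod_of_dvd _ dvd_rfl
    have hab := Int.gcd_eq_gcd_ab a0 N
    rw [hgcd] at hab
    have hax : a0 * Int.gcdA a0 N = 1 - N * Int.gcdB a0 N := by push_cast at hab; linarith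
    have h2 : a0 * Int.gcdA a0 N ≡ 1 [ZMOD N] := by
      show (a0 * Int.gcdA a0 N) % N = 1 % N
      rw [hax, Int.sub_mul_emod_self_left]
    exact (Int.ModEq.mul_left a0 e2).trans h2

theorem preCmd_cases (N : Int) (cmd : String) (h : preCmd N cmd = true) :
    (∃ n, parseA cmd = some (OpA.cutOp n) ∧ affineB cmd = some (1, -n)) ∨
    (parseA cmd = some OpA.newOp ∧ affineB cmd = some (-1, -1)) ∨
    (∃ n, parseA cmd = some (OpA.incOp n) ∧ affineB cmd = some (n, 0) ∧ Int.gcd n N = 1) := by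
  unfold preCmd at h
  unfold parseA affineB
  simp only at h ⊢
  split_ifs at h ⊢ with h1 h2 h3
  · rcases ho : PySem.Int.ofChars? (PySem.List.slice (PySem.Chars.lower (PySem.Chars.strip cmd.toList)) (some 4) none) with _ | n
    · rw [ho] at h; simp at h
    · exact Or.inl ⟨n, rfl, rfl⟩
  · exact Or.inr (Or.inl ⟨rfl, rfl⟩)
  · rcases ho : PySem.Int.ofChars? (PySem.List.slice (PySem.Chars.lower (PySem.Chars.strip cmd.toList)) (some 19) none) with _ | n
    · rw [ho] at h; simp at h
    · rw [ho] at h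
      simp at h
      exact Or.inr (Or.inr ⟨n, rfl, rfl, h⟩)

theorem fold_rel (N : Int) (hN : 0 < N) :
    ∀ (cmds : List String), (∀ cmd ∈ cmds, preCmd N cmd = true) →
    ∀ (mA cA mB cB : Int), mB % N = mA % N → cB % N = cA % N → Int.gcd mA N = 1 →
    ∃ mA' cA' mB' cB',
      cmds.foldl (stepA N) (some (mA, cA)) = some (mA', cA') ∧
      cmds.foldl (stepB N) (some (mB, cB)) = some (mB', cB') ∧
      mB' % N = mA' % N ∧ cB' % N = cA' % N ∧ Int.gcd mA' N = 1 := by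
  intro cmds
  induction cmds with
  | nil =>
    intro _ mA cA mB cB hm hc hg
    exact ⟨mA, cA, mB, cB, rfl, rfl, hm, hc, hg⟩
  | cons cmd rest ih =>
    intro hpre mA cA mB cB hm hc hg
    have hcmd := hpre cmd (by simp)
    have hrest : ∀ c ∈ rest, preCmd N c = true := fun c hcm => hpre c (by simp [hcm])
    rcases preCmd_cases N cmd hcmd with ⟨n, hA, hB⟩ | ⟨hA, hB⟩ | ⟨n, hA, hB, hgn⟩
    · -- cut n
      simp only [List.foldl_cons, stepA, stepB, updateParamsA, hA, hB, compB]
      apply ih hrest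
      · simp only [PySem.Int.mod_eq_emod_of_pos hN, Int.emod_emod_of_dvd _ dvd_rfl]
        show (1 * mB : Int) ≡ mA [ZMOD N]
        calc (1 * mB : Int) = mB := by ring
          _ ≡ mA [ZMOD N] := hm
      · simp only [PySem.Int.mod_eq_emod_of_pos hN, Int.emod_emod_of_dvd _ dvd_rfl]
        show (1 * cB + -n : Int) ≡ cA - n [ZMOD N]
        calc (1 * cB + -n : Int) = cB - n := by ring
          _ ≡ cA - n [ZMOD N] := Int.ModEq.sub_right n hc
      · exact hg
    · -- deal into new stack
      simp only [List.foldl_cons, stepA, stepB, updateParamsA, hA, hB, compB]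
      apply ih hrest
      · simp only [PySem.Int.mod_eq_emod_of_pos hN, Int.emod_emod_of_dvd _ dvd_rfl]
        show (-1 * mB : Int) ≡ -mA [ZMOD N]
        calc (-1 * mB : Int) = -mB := by ring
          _ ≡ -mA [ZMOD N] := Int.ModEq.neg hm
      · simp only [PySem.Int.mod_eq_emod_of_pos hN, Int.emod_emod_of_dvd _ dvd_rfl]
        show (-1 * cB + -1 : Int) ≡ -cA - 1 [ZMOD N]
        calc (-1 * cB + -1 : Int) = -cB - 1 := by ring
          _ ≡ -cA - 1 [ZMOD N] := Int.ModEq.sub_right 1 (Int.ModEq.neg hc)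
      · rw [Int.neg_gcd]; exact hg
    · -- deal with increment n
      simp only [List.foldl_cons, stepA, stepB, updateParamsA, hA, hB, compB]
      apply ih hrest
      · simp only [PySem.Int.mod_eq_emod_of_pos hN, Int.emod_emod_of_dvd _ dvd_rfl]
        show (n * mB : Int) ≡ mA * n [ZMOD N]
        calc (n * mB : Int) ≡ n * mA [ZMOD N] := Int.ModEq.mul_left n hm
          _ = mA * n := by ring
      · simp only [PySem.Int.mod_eq_emod_of_pos hN, Int.emod_emod_of_dvd _ dvd_rfl]
        show (n * cB + 0 : Int) ≡ cA * n [ZMOD N]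
        calc (n * cB + 0 : Int) = n * cB := by ring
          _ ≡ n * cA [ZMOD N] := Int.ModEq.mul_left n hc
          _ = cA * n := by ring
      · rw [← Int.isCoprime_iff_gcd_eq_one] at hg hgn ⊢
        exact IsCoprime.mul_left hg hgn

-- ===== VERDICT (by name: the statement is the Claim_ definition above) =====
theorem part_2_spec : Claim_equal_part_2 := by
  intro N cmds pos t _ hpre
  obtain ⟨hN, ht, hcmds⟩ := hpre
  unfold Spec_part_2 part_2 part_2_alt
  obtain ⟨mA', cA', mB', cB', hfA, hfB, hm, hc, hg⟩ :=
    fold_rel N (by omega) cmds hcmds 1 0 1 0 rfl rfl (by simp)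
  rw [hfA, hfB]
  dsimp only
  have hNpos : (0 : Int) < N := by omega
  have hinv : modinvA mA' N = invB mB' N := modinv_eq N mA' mB' hNpos hm hg
  rw [← hinv]
  set i := modinvA mA' N with hi
  have hic : PySem.Int.mod (-i * cB') N = PySem.Int.mod (-i * cA') N := by
    simp only [PySem.Int.mod_eq_emod_of_pos hNpos]
    exact Int.ModEq.mul_left (-i) hc
  rw [hic]
  set ic := PySem.Int.mod (-i * cA') N with hic2
  rcases hU : apow (i, ic) t.toNat with ⟨u1, u2⟩
  have hA := upfrcA_eq N i ic hNpos t.toNat t ht le_rfl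
  rw [hU] at hA
  have hB := bloopB_eq N hNpos t.toNat t (i, ic) (1, 0) le_rfl
  rcases hV : bloopB t.toNat N t (i, ic) (1, 0) with ⟨v1, v2⟩
  rw [hV, amul_id_right, hU] at hB
  have hv1 : v1 % N = u1 % N := congrArg Prod.fst hB
  have hv2 : v2 % N = u2 % N := congrArg Prod.snd hB
  rw [hA]
  simp only [ared, PySem.Int.mod_eq_emod_of_pos hNpos]
  have e1 : (u1 % N : Int) ≡ v1 [ZMOD N] := (Int.emod_emod_of_dvd u1 dvd_rfl).trans hv1.symm
  have e2 : (u2 % N : Int) ≡ v2 [ZMOD N] := (Int.emod_emod_of_dvd u2 dvd_rfl).trans hv2.symm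
  exact Int.ModEq.add (e1.mul_right pos) e2
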